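-- pv_equiv track=rewrite | github.com/med13foundation/monorepo | src/application/agents/services/_relation_endpoint_label_resolution_helpers.py | extract_primary_token
-- ===== SOURCE A (Python) =====
-- def extract_primary_token(normalized_label: str) -> str | None:
--     """Extract the strongest token for coarse concept matching."""
--     tokens = normalized_label.split()
--     if not tokens:
--         return None
--     for token in tokens:
--         if any(char.isdigit() for char in token) and any(
--             char.isalpha() for char in token
--         ):
--             return token
--     for token in tokens:
--         if any(char.isalpha() for char in token):
--             return token
--     return tokens[0]
-- ===== SOURCE B (Python) =====
-- def extract_primary_token(normalized_label: str) -> str | None: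
--     """Single pass: return the first digit+alpha token; else the first alpha token; else the first token."""
--     tokens = normalized_label.split()
--     if not tokens:
--         return None
--     alpha = None
--     for token in tokens:
--         has_digit = any(c.isdigit() for c in token)
--         has_alpha = any(c.isalpha() for c in token)
--         if has_digit and has_alpha:
--             return token
--         if alpha is None and has_alpha:
--             alpha = token
--     return alpha if alpha is not None else tokens[0]
-- ===== Notes on version B (the rewrite author's own statement) =====
-- stated objective: alternative
-- what changed: Replaces A's two sequential scans of the token list by one single-pass loop that returns a digit+alpha token immediately while remembering the first alpha-only token as a fallback.
import Mathlib
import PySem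

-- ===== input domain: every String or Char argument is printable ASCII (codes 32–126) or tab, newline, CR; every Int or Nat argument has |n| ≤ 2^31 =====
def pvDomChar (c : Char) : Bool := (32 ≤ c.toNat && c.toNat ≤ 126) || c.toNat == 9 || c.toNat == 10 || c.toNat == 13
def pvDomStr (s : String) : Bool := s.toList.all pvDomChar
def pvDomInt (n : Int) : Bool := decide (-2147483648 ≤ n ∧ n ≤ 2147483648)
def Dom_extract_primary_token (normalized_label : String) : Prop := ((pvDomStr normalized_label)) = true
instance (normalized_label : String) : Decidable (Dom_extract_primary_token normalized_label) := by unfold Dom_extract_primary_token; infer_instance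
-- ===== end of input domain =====

-- B is a single-pass loop replacing A's two sequential scans; same result, alternative decomposition.

-- ===== PORT A =====
-- first for-loop of A: first token containing both a digit and a letter
def epFirstDigitAlpha : List String → Option String
  | [] => none
  | t :: ts =>
    if (t.toList.any PySem.Chars.isdigit) && (t.toList.any PySem.Chars.isalpha) then some t
    else epFirstDigitAlpha ts

-- second for-loop of A: first token containing a letter
def epFirstAlpha : List String → Option String
  | [] => none
  | t :: ts =>
    if t.toList.any PySem.Chars.isalpha then some t
    else epFirstAlpha ts

def extract_primary_token (normalized_label : String) : Option String :=
  let tokens := PySem.Str.split₀ normalized_label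
  match tokens with
  | [] => none
  | t0 :: _ =>
    match epFirstDigitAlpha tokens with
    | some t => some t
    | none =>
      match epFirstAlpha tokens with
      | some t => some t
      | none => some t0

-- ===== PORT B =====
-- B's single loop: return a digit+alpha token at once, remember the first alpha-only token
def epLoop (first : String) (alpha : Option String) : List String → Option String
  | [] => match alpha with
          | some a => some a
          | none => some first
  | t :: ts =>
    let hasDigit := t.toList.any PySem.Chars.isdigit
    let hasAlpha := t.toList.any PySem.Chars.isalpha
    if hasDigit && hasAlpha then some t
    else epLoop first (if alpha.isNone && hasAlpha then some t else alpha) ts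

def extract_primary_token_alt (normalized_label : String) : Option String :=
  match PySem.Str.split₀ normalized_label with
  | [] => none
  | t0 :: ts => epLoop t0 none (t0 :: ts)

-- ===== PRECONDITION & SPEC =====
def Spec_extract_primary_token (normalized_label : String) (out : Option String) : Prop := out = extract_primary_token_alt normalized_label
instance (normalized_label : String) (out : Option String) : Decidable (Spec_extract_primary_token normalized_label out) := by unfold Spec_extract_primary_token; infer_instance

-- ===== CLAIM (what is proved, stated in full; the proofs are below) =====
def Claim_equal_extract_primary_token : Prop := ∀ (normalized_label : String), Dom_extract_primary_token normalized_label → Spec_extract_primary_token normalized_label (extract_primary_token normalized_label)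

-- ===== LEMMAS AND PROOFS =====

-- B's loop state equals A's two-scan result, generalized over the remembered alpha token
theorem epLoop_eq (ts : List String) : ∀ (first : String) (alpha : Option String),
    epLoop first alpha ts =
      match epFirstDigitAlpha ts with
      | some t => some t
      | none =>
        match alpha with
        | some a => some a
        | none =>
          match epFirstAlpha ts with
          | some t => some t
          | none => some first := by
  induction ts with
  | nil => intro first alpha; cases alpha <;> simp [epLoop, epFirstDigitAlpha, epFirstAlpha]
  | cons t ts ih =>
    intro first alpha
    simp only [epLoop, epFirstDigitAlpha, epFirstAlpha]
    by_cases hda : (t.toList.any PySem.Chars.isdigit) && (t.toList.any PySem.Chars.isalpha)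
    · simp [hda]
    · simp only [hda, if_false, Bool.false_eq_true]
      rw [ih]
      cases alpha with
      | some a => simp
      | none =>
        by_cases ha : t.toList.any PySem.Chars.isalpha
        · simp [ha]
        · simp [ha]

-- ===== VERDICT (by name: the statement is the Claim_ definition above) =====
theorem extract_primary_token_spec : Claim_equal_extract_primary_token := by
  intro s _
  unfold Spec_extract_primary_token extract_primary_token extract_primary_token_alt
  cases h : PySem.Str.split₀ s with
  | nil => simp
  | cons t0 ts => simp only [epLoop_eq]
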